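-- pv_equiv track=rewrite | github.com/polymonster/pmtech | tools/build_shaders.py | find_struct_declarations
-- ===== SOURCE A (Python) =====
-- special_structs = ["vs_input", "vs_output", "ps_input", "ps_output", "vs_instance_input"]
--
-- def find_struct_declarations(shader_text):
--     struct_list = []
--     start = 0
--     while start != -1:
--         start = shader_text.find("struct", start)
--         if start == -1:
--             break
--         end = shader_text.find("};", start)
--         if end != -1:
--             end += 2
--             found_struct = shader_text[start:end]
--             valid = True
--             for ss in special_structs:
--                 if ss in found_struct:
--                     valid = False
--             if valid:
--                 struct_list.append(shader_text[start:end] + "\n")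
--         start = end
--     return struct_list
-- ===== SOURCE B (Python) =====
-- special_structs = ["vs_input", "vs_output", "ps_input", "ps_output", "vs_instance_input"]
--
-- def find_struct_declarations(shader_text):
--     # one pass over the "};"-separated parts; no index bookkeeping
--     struct_list = []
--     for part in shader_text.split("};")[:-1]:
--         i = part.find("struct")
--         if i != -1:
--             decl = part[i:] + "};"
--             if not any(ss in decl for ss in special_structs):
--                 struct_list.append(decl + "\n")
--     return struct_list
-- ===== Notes on version B (the rewrite author's own statement) =====
-- stated objective: idiomatic
-- what changed: A's manual while-loop with explicit start/end index bookkeeping and repeated str.find calls is replaced by one pass over the parts of shader_text.split('};') (last part dropped): each part containing 'struct' yields the block from its first 'struct' to the delimiter, so no index state remains.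
import Mathlib
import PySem

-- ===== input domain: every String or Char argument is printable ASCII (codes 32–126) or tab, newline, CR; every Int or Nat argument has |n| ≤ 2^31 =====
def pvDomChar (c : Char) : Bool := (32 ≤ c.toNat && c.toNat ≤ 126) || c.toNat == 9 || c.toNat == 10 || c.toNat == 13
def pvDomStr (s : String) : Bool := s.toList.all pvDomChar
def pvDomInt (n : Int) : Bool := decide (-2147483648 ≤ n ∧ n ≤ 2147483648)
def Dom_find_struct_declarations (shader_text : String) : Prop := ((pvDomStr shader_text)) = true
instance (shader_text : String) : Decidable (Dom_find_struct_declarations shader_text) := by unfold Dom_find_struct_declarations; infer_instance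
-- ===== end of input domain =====

-- B replaces A's manual while-loop index bookkeeping by one pass over the "};"-split parts (idiomatic; same cost).


-- ===== PORT A =====
-- module constant special_structs (shared by both Pythons)
def special_structs : List (List Char) :=
  ["vs_input".toList, "vs_output".toList, "ps_input".toList, "ps_output".toList, "vs_instance_input".toList]

-- A's while-loop: state = (start, struct_list); fuel only makes the loop total (start grows by ≥ 2 each
-- iteration and stays ≤ length, so length+1 iterations are never exhausted).
def fsdLoop (s : List Char) (fuel : Nat) (start : Int) (acc : List (List Char)) : List (List Char) :=
  match fuel with
  | 0 => acc
  | fuel + 1 =>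
    if start = -1 then acc
    else
      let st := PySem.Chars.findFrom s "struct".toList start
      if st = -1 then acc
      else
        let e := PySem.Chars.findFrom s "};".toList st
        if e = -1 then acc    -- start := end = -1, while-condition fails, no append
        else
          let e2 := e + 2
          let found := PySem.Chars.slice s (some st) (some e2)
          let valid := special_structs.foldl (fun v ss => if PySem.Chars.isIn ss found then false else v) true
          fsdLoop s fuel e2 (if valid then acc ++ [found ++ ['\n']] else acc)

def find_struct_declarations (shader_text : String) : List String :=
  (fsdLoop shader_text.toList (shader_text.toList.length + 1) 0 []).map (fun cs => String.ofList cs)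

-- ===== PORT B =====
-- body of B's for-loop over the split parts
def fsdPart (acc : List (List Char)) (part : List Char) : List (List Char) :=
  let i := PySem.Chars.find part "struct".toList
  if i ≠ -1 then
    let decl := PySem.Chars.slice part (some i) none ++ "};".toList
    if !(special_structs.any fun ss => PySem.Chars.isIn ss decl) then acc ++ [decl ++ ['\n']] else acc
  else acc

def find_struct_declarations_alt (shader_text : String) : List String :=
  ((PySem.List.slice (PySem.Chars.splitOn shader_text.toList "};".toList) none (some (-1))).foldl
      fsdPart []).map (fun cs => String.ofList cs)

-- ===== PRECONDITION & SPEC =====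
def Spec_find_struct_declarations (shader_text : String) (out : List String) : Prop := out = find_struct_declarations_alt shader_text
instance (shader_text : String) (out : List String) : Decidable (Spec_find_struct_declarations shader_text out) := by unfold Spec_find_struct_declarations; infer_instance

-- ===== CLAIM (what is proved, stated in full; the proofs are below) =====
def Claim_equal_find_struct_declarations : Prop := ∀ (shader_text : String), Dom_find_struct_declarations shader_text → Spec_find_struct_declarations shader_text (find_struct_declarations shader_text)

-- ===== LEMMAS AND PROOFS =====

-- common reference function: blocks of t, one per struct declaration, recursing on suffixes
def charA (t : List Char) : List (List Char) :=
  if _hi : PySem.Chars.find t "struct".toList < 0 then []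
  else if _hj : PySem.Chars.find (t.drop (PySem.Chars.find t "struct".toList).toNat) "};".toList < 0 then []
  else
    (if special_structs.any (fun ss => PySem.Chars.isIn ss
          ((t.drop (PySem.Chars.find t "struct".toList).toNat).take
            ((PySem.Chars.find (t.drop (PySem.Chars.find t "struct".toList).toNat) "};".toList).toNat + 2)))
      then []
      else [((t.drop (PySem.Chars.find t "struct".toList).toNat).take
              ((PySem.Chars.find (t.drop (PySem.Chars.find t "struct".toList).toNat) "};".toList).toNat + 2)) ++ ['\n']])
      ++ charA ((t.drop (PySem.Chars.find t "struct".toList).toNat).drop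
            ((PySem.Chars.find (t.drop (PySem.Chars.find t "struct".toList).toNat) "};".toList).toNat + 2))
termination_by t.length
decreasing_by
  have h1 := (PySem.Chars.find_spec (s := t) (sub := "struct".toList) (not_lt.mp _hi)).1.length_le
  simp only [List.length_drop] at *
  have : ("struct".toList).length = 6 := by decide
  omega

-- pure form of B's fold over the parts (last part dropped)
def gB : List (List Char) → List (List Char)
  | [] => []
  | [_] => []
  | p :: q :: rest => fsdPart [] p ++ gB (q :: rest)

lemma validFold (blk : List Char) (l : List (List Char)) (b : Bool) :
    l.foldl (fun v ss => if PySem.Chars.isIn ss blk then false else v) b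
      = (b && !(l.any fun ss => PySem.Chars.isIn ss blk)) := by
  induction l generalizing b with
  | nil => simp
  | cons a l ih =>
    simp only [List.foldl_cons]
    rw [ih]
    cases h : PySem.Chars.isIn a blk <;> simp [h]

-- ---- lemmas about splitOn.go (SEP = "};".toList = ['}',';']) ----

lemma go_zero (sep : List Char) (l cur : List Char) (acc : List (List Char)) :
    PySem.Chars.splitOn.go sep 0 l cur acc = ((cur.reverse ++ l) :: acc).reverse := by
  rw [PySem.Chars.splitOn.go]

lemma go_nil (sep : List Char) (f : Nat) (cur : List Char) (acc : List (List Char)) :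
    PySem.Chars.splitOn.go sep (f + 1) [] cur acc = (cur.reverse :: acc).reverse := by
  rw [PySem.Chars.splitOn.go]
  omega

lemma go_cons (sep : List Char) (f : Nat) (c : Char) (rest cur : List Char) (acc : List (List Char)) :
    PySem.Chars.splitOn.go sep (f + 1) (c :: rest) cur acc =
      if sep.isPrefixOf (c :: rest) then
        PySem.Chars.splitOn.go sep f ((c :: rest).drop sep.length) [] (cur.reverse :: acc)
      else PySem.Chars.splitOn.go sep f rest (c :: cur) acc := by
  rw [PySem.Chars.splitOn.go]

lemma go_no_sep (sep : List Char) (hsep : sep ≠ []) :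
    ∀ (l : List Char) (fuel : Nat) (cur : List Char) (acc : List (List Char)), l.length ≤ fuel →
      (¬ ∃ j, sep <+: l.drop j) →
      PySem.Chars.splitOn.go sep fuel l cur acc = acc.reverse ++ [cur.reverse ++ l] := by
  intro l
  induction l with
  | nil =>
    intro fuel cur acc _ _
    match fuel with
    | 0 => rw [go_zero]; simp
    | f + 1 => rw [go_nil]; simp
  | cons c rest ih =>
    intro fuel cur acc hfuel hno
    match fuel with
    | f + 1 =>
      rw [go_cons]
      have hpre : sep.isPrefixOf (c :: rest) = false := by
        rw [Bool.eq_false_iff]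
        intro h
        exact hno ⟨0, by simpa using List.isPrefixOf_iff_prefix.mp h⟩
      rw [hpre]
      simp only [Bool.false_eq_true, if_false]
      rw [ih f (c :: cur) acc (by simpa using hfuel)
        (fun ⟨j, hj⟩ => hno ⟨j + 1, by simpa using hj⟩)]
      simp

lemma go_acc (sep : List Char) :
    ∀ (fuel : Nat) (l cur : List Char) (acc : List (List Char)),
      PySem.Chars.splitOn.go sep fuel l cur acc = acc.reverse ++ PySem.Chars.splitOn.go sep fuel l cur [] := by
  intro fuel
  induction fuel with
  | zero => intro l cur acc; rw [go_zero, go_zero]; simp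
  | succ f ih =>
    intro l cur acc
    match l with
    | [] => rw [go_nil, go_nil]; simp
    | c :: rest =>
      rw [go_cons, go_cons]
      by_cases hpre : sep.isPrefixOf (c :: rest) = true
      · rw [hpre]
        simp only [if_true]
        rw [ih _ _ (cur.reverse :: acc), ih _ _ [cur.reverse]]
        simp
      · rw [Bool.eq_false_iff.mpr hpre]
        simp only [Bool.false_eq_true, if_false]
        exact ih _ _ acc

lemma go_fuel (sep : List Char) (hsep : sep ≠ []) :
    ∀ (n : Nat) (l : List Char), l.length ≤ n → ∀ (f1 f2 : Nat) (cur : List Char) (acc : List (List Char)),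
      l.length ≤ f1 → l.length ≤ f2 →
      PySem.Chars.splitOn.go sep f1 l cur acc = PySem.Chars.splitOn.go sep f2 l cur acc := by
  intro n
  induction n with
  | zero =>
    intro l hl f1 f2 cur acc h1 h2
    have : l = [] := List.length_eq_zero_iff.mp (by omega)
    subst this
    match f1, f2 with
    | 0, 0 => rfl
    | 0, g + 1 => rw [go_zero, go_nil]; simp
    | g + 1, 0 => rw [go_zero, go_nil]; simp
    | g + 1, g' + 1 => rw [go_nil, go_nil]
  | succ n ih =>
    intro l hl f1 f2 cur acc h1 h2
    match l with
    | [] =>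
      match f1, f2 with
      | 0, 0 => rfl
      | 0, g + 1 => rw [go_zero, go_nil]; simp
      | g + 1, 0 => rw [go_zero, go_nil]; simp
      | g + 1, g' + 1 => rw [go_nil, go_nil]
    | c :: rest =>
      match f1, f2 with
      | g + 1, g' + 1 =>
        rw [go_cons, go_cons]
        by_cases hpre : sep.isPrefixOf (c :: rest) = true
        · rw [hpre]
          simp only [if_true]
          have hlen : 1 ≤ sep.length := by
            cases sep with
            | nil => exact absurd rfl hsep
            | cons _ _ => simp
          refine ih _ ?_ _ _ _ _ ?_ ?_ <;> (simp at hl h1 h2 ⊢; omega)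
        · rw [Bool.eq_false_iff.mpr hpre]
          simp only [Bool.false_eq_true, if_false]
          refine ih _ ?_ _ _ _ _ ?_ ?_ <;> (simp at hl h1 h2; omega)

lemma go_ne_nil (sep : List Char) :
    ∀ (fuel : Nat) (l cur : List Char) (acc : List (List Char)),
      PySem.Chars.splitOn.go sep fuel l cur acc ≠ [] := by
  intro fuel
  induction fuel with
  | zero => intro l cur acc; rw [go_zero]; simp
  | succ f ih =>
    intro l cur acc
    match l with
    | [] => rw [go_nil]; simp
    | c :: rest =>
      rw [go_cons]
      by_cases hpre : sep.isPrefixOf (c :: rest) = true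
      · rw [hpre]; simp only [if_true]; exact ih _ _ _
      · rw [Bool.eq_false_iff.mpr hpre]
        simp only [Bool.false_eq_true, if_false]
        exact ih _ _ _

lemma go_step :
    ∀ (p : List Char) (fuel : Nat) (cur : List Char) (acc : List (List Char)) (r : List Char),
      (¬ ∃ j, "};".toList <+: p.drop j) → p.length + 1 ≤ fuel →
      PySem.Chars.splitOn.go "};".toList fuel (p ++ "};".toList ++ r) cur acc
        = PySem.Chars.splitOn.go "};".toList (fuel - (p.length + 1)) r [] ((cur.reverse ++ p) :: acc) := by
  intro p
  induction p with
  | nil =>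
    intro fuel cur acc r _ hfuel
    match fuel with
    | f + 1 =>
      rw [show ([] ++ "};".toList ++ r : List Char) = '}' :: (';' :: r) from rfl]
      rw [go_cons]
      have hpre : ("};".toList).isPrefixOf ('}' :: (';' :: r)) = true :=
        List.isPrefixOf_iff_prefix.mpr ⟨r, rfl⟩
      rw [hpre]
      simp only [if_true]
      have hdrop : (('}' :: (';' :: r)).drop ("};".toList).length) = r := rfl
      rw [hdrop]
      simp
  | cons c p' ih =>
    intro fuel cur acc r hno hfuel
    match fuel with
    | f + 1 =>
      have hpre : ("};".toList).isPrefixOf (c :: (p' ++ "};".toList ++ r)) = false := by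
        rw [Bool.eq_false_iff]
        intro h
        have h2 := List.isPrefixOf_iff_prefix.mp h
        match p' with
        | [] =>
          obtain ⟨u, hu⟩ := h2
          simp at hu
        | d :: p'' =>
          obtain ⟨u, hu⟩ := h2
          simp at hu
          obtain ⟨h3, h4, -⟩ := hu
          refine hno ⟨0, ?_⟩
          simp only [List.drop_zero]
          exact ⟨p'', by rw [← h3, ← h4]; rfl⟩
      rw [show (c :: p' ++ "};".toList ++ r : List Char) = c :: (p' ++ "};".toList ++ r) from rfl]
      rw [go_cons, hpre]
      simp only [Bool.false_eq_true, if_false]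
      rw [ih f (c :: cur) acc r (fun ⟨j, hj⟩ => hno ⟨j + 1, by rw [List.drop_succ_cons]; exact hj⟩)
        (by simp at hfuel; omega)]
      have h5 : f - (p'.length + 1) = f + 1 - ((c :: p').length + 1) := by simp
      have h6 : ((c :: cur).reverse ++ p') = cur.reverse ++ (c :: p') := by simp
      rw [h5, h6]

lemma splitOn_no_sep (t : List Char) (h : ¬ ∃ j, "};".toList <+: t.drop j) :
    PySem.Chars.splitOn t "};".toList = [t] := by
  unfold PySem.Chars.splitOn
  rw [go_no_sep "};".toList (by decide) t (t.length + 1) [] [] (by omega) h]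
  simp

lemma splitOn_step (p r : List Char) (h : ¬ ∃ j, "};".toList <+: p.drop j) :
    PySem.Chars.splitOn (p ++ "};".toList ++ r) "};".toList = p :: PySem.Chars.splitOn r "};".toList := by
  unfold PySem.Chars.splitOn
  rw [go_step p ((p ++ "};".toList ++ r).length + 1) [] [] r h (by simp)]
  have hlen : (p ++ "};".toList ++ r).length + 1 - (p.length + 1) = r.length + 2 := by
    simp [List.length_append]
  rw [hlen]
  rw [go_acc]
  rw [go_fuel "};".toList (by decide) r.length r le_rfl (r.length + 2) (r.length + 1) [] []
    (by omega) (by omega)]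
  simp

lemma splitOn_ne_nil (t sep : List Char) : PySem.Chars.splitOn t sep ≠ [] := by
  unfold PySem.Chars.splitOn
  exact go_ne_nil sep _ _ _ _

-- ---- find helpers ----

lemma find_eq_of (s sub : List Char) (k : Nat) (h : sub <+: s.drop k)
    (hmin : ∀ i < k, ¬ sub <+: s.drop i) : PySem.Chars.find s sub = (k : Int) := by
  have hin : PySem.Chars.isIn sub s = true := (PySem.Chars.exists_prefix_drop_iff_isIn sub s).mp ⟨k, h⟩
  have h0 : 0 ≤ PySem.Chars.find s sub :=
    (PySem.Chars.find_nonneg_iff s sub).mpr ((PySem.Chars.isIn_iff_infix sub s).mp hin)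
  obtain ⟨h1, h2⟩ := PySem.Chars.find_spec (s := s) (sub := sub) h0
  rcases lt_trichotomy (PySem.Chars.find s sub).toNat k with hlt | heq | hgt
  · exact absurd h1 (hmin _ hlt)
  · omega
  · exact absurd h (h2 k hgt)

lemma find_none_of (s sub : List Char) (h : ¬ ∃ j, sub <+: s.drop j) :
    PySem.Chars.find s sub = -1 := by
  refine (PySem.Chars.find_eq_neg_one_iff s sub).mpr fun hin => ?_
  exact h ((PySem.Chars.exists_prefix_drop_iff_isIn sub s).mpr ((PySem.Chars.isIn_iff_infix sub s).mpr hin))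

lemma prefix_take (sub l : List Char) (n : Nat) (h : sub <+: l) (hn : sub.length ≤ n) :
    sub <+: l.take n := by
  rw [List.prefix_iff_eq_take] at h ⊢
  rw [List.take_take, min_eq_left hn]
  exact h

lemma prefix_drop_take (sub t : List Char) (q m : Nat) (h : sub <+: (t.take m).drop q) :
    sub <+: t.drop q := by
  rw [List.drop_take] at h
  exact h.trans (List.take_prefix _ _)

lemma dropPSR (p r : List Char) (q : Nat) :
    (p ++ "};".toList ++ r).drop (p.length + 2 + q) = r.drop q := by
  rw [List.append_assoc, List.drop_append]
  have h1 : p.drop (p.length + 2 + q) = [] := List.drop_eq_nil_of_le (by omega)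
  have h2 : p.length + 2 + q - p.length = 2 + q := by omega
  rw [h1, h2, List.nil_append, List.drop_append]
  have h3 : ("};".toList).drop (2 + q) = [] := List.drop_eq_nil_of_le (by simp)
  have h4 : 2 + q - ("};".toList).length = q := by simp
  rw [h3, h4, List.nil_append]

-- no "struct" occurrence can touch the separator region: it lies in p or in r
lemma keyPos (p r : List Char) (q : Nat)
    (h : "struct".toList <+: (p ++ "};".toList ++ r).drop q) :
    q + 6 ≤ p.length ∨ p.length + 2 ≤ q := by
  by_contra hc
  push_neg at hc
  obtain ⟨h1, h2⟩ := hc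
  obtain ⟨w, hw⟩ := h
  rcases Nat.lt_or_ge p.length q with hq | hq
  · -- q = p.length + 1: the suffix starts with ';' but "struct" starts with 's'
    have hq1 : q = p.length + 1 := by omega
    have hR : (p ++ "};".toList ++ r).drop (p.length + 1) = ';' :: r := by
      rw [List.drop_append_of_le_length (by simp)]
      have hmid : (p ++ "};".toList).drop (p.length + 1) = [';'] := by
        rw [List.drop_append, List.drop_eq_nil_of_le (by omega)]
        have e2 : p.length + 1 - p.length = 1 := by omega
        rw [e2]
        rfl
      rw [hmid]
      rfl
    rw [hq1, hR] at hw
    have h0 := congrArg (fun l => l[0]?) hw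
    simp at h0
  · -- q ≤ p.length < q + 6: char p.length - q of "struct" would be '}'
    have hdrop : (p ++ "};".toList ++ r).drop q = p.drop q ++ ("};".toList ++ r) := by
      rw [List.append_assoc]
      exact List.drop_append_of_le_length hq
    rw [hdrop] at hw
    set d := p.length - q with hdd
    have hd6 : d < 6 := by omega
    have hlen : (p.drop q).length = d := by rw [List.length_drop]
    have hL : ("struct".toList ++ w)[d]? = ("struct".toList)[d]? :=
      List.getElem?_append_left (by have h6 : ("struct".toList).length = 6 := rfl; omega)
    have hR : (p.drop q ++ ("};".toList ++ r))[d]? = some '}' := by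
      rw [List.getElem?_append_right (by omega)]
      simp [hlen]
    rw [hw, hR] at hL
    interval_cases d <;> exact absurd hL (by decide)

-- both branches of charA produce equal results on suffix-equal states
lemma charA_shift (t r : List Char)
    (ht : ¬ PySem.Chars.find t "struct".toList < 0)
    (hr : ¬ PySem.Chars.find r "struct".toList < 0)
    (h : t.drop (PySem.Chars.find t "struct".toList).toNat
        = r.drop (PySem.Chars.find r "struct".toList).toNat) :
    charA t = charA r := by
  conv_lhs => rw [charA]
  conv_rhs => rw [charA]
  rw [dif_neg ht, dif_neg hr, h]

lemma core_nosep (t : List Char) (h : ¬ ∃ j, "};".toList <+: t.drop j) :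
    charA t = gB (PySem.Chars.splitOn t "};".toList) := by
  rw [splitOn_no_sep t h]
  have hj : PySem.Chars.find (t.drop (PySem.Chars.find t "struct".toList).toNat) "};".toList = -1 := by
    apply find_none_of
    rintro ⟨j, hj⟩
    rw [List.drop_drop] at hj
    exact h ⟨_, hj⟩
  rw [charA]
  split_ifs with h1 h2 h3
  · rfl
  · rfl
  all_goals rw [hj] at h2
  all_goals exact absurd (by norm_num) h2

lemma core (n : Nat) : ∀ t : List Char, t.length ≤ n →
    charA t = gB (PySem.Chars.splitOn t "};".toList) := by
  induction n with
  | zero =>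
    intro t ht
    have ht0 : t = [] := List.length_eq_zero_iff.mp (by omega)
    subst ht0
    exact core_nosep [] (by rintro ⟨j, hj⟩; simp [List.prefix_nil] at hj)
  | succ n ih =>
    intro t ht
    by_cases hsep : ∃ j, "};".toList <+: t.drop j
    case neg => exact core_nosep t hsep
    case pos =>
    have hin : PySem.Chars.isIn "};".toList t = true :=
      (PySem.Chars.exists_prefix_drop_iff_isIn _ _).mp hsep
    have h0 : 0 ≤ PySem.Chars.find t "};".toList :=
      (PySem.Chars.find_nonneg_iff _ _).mpr ((PySem.Chars.isIn_iff_infix _ _).mp hin)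
    obtain ⟨hS1, hS2⟩ := PySem.Chars.find_spec (s := t) (sub := "};".toList) h0
    set m := (PySem.Chars.find t "};".toList).toNat with hm
    obtain ⟨u, hu⟩ := hS1
    have hmlen : m + 2 ≤ t.length := by
      have hc := congrArg List.length hu
      simp only [List.length_drop, List.length_append] at hc
      have : ("};".toList).length = 2 := by decide
      omega
    have hu' : u = t.drop (m + 2) := by
      have h2 : (t.drop m).drop 2 = t.drop (m + 2) := by rw [List.drop_drop]
      rw [← h2, ← hu]
      rfl
    have hdecomp : t = t.take m ++ "};".toList ++ t.drop (m + 2) := by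
      conv_lhs => rw [← List.take_append_drop m t]
      rw [← hu, hu', ← List.append_assoc]
    set p := t.take m with hp
    set r := t.drop (m + 2) with hr
    have hplen : p.length = m := by
      rw [hp, List.length_take]
      omega
    have hpsep : ¬ ∃ j, "};".toList <+: p.drop j := by
      rintro ⟨j, hj⟩
      have hjlen := hj.length_le
      have h2 : ("};".toList).length = 2 := by decide
      rw [List.length_drop, hplen, h2] at hjlen
      exact hS2 j (by omega) (prefix_drop_take _ t j m hj)
    have hsplit : PySem.Chars.splitOn t "};".toList = p :: PySem.Chars.splitOn r "};".toList := by
      conv_lhs => rw [hdecomp]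
      exact splitOn_step p r hpsep
    have hrlen : r.length ≤ n := by
      rw [hr, List.length_drop]
      omega
    have hIH : charA r = gB (PySem.Chars.splitOn r "};".toList) := ih r hrlen
    have hgb : gB (p :: PySem.Chars.splitOn r "};".toList)
        = fsdPart [] p ++ gB (PySem.Chars.splitOn r "};".toList) := by
      cases hsp : PySem.Chars.splitOn r "};".toList with
      | nil => exact absurd hsp (splitOn_ne_nil r _)
      | cons a l => rw [gB]
    rw [hsplit, hgb, ← hIH]
    by_cases hK : PySem.Chars.find t "struct".toList < 0
    · -- no "struct" anywhere in t
      have hnt : ¬ ∃ j, "struct".toList <+: t.drop j := by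
        rintro ⟨j, hj⟩
        have : 0 ≤ PySem.Chars.find t "struct".toList :=
          (PySem.Chars.find_nonneg_iff _ _).mpr
            ((PySem.Chars.isIn_iff_infix _ _).mp ((PySem.Chars.exists_prefix_drop_iff_isIn _ _).mp ⟨j, hj⟩))
        omega
      have hfp : PySem.Chars.find p "struct".toList = -1 := by
        apply find_none_of
        rintro ⟨j, hj⟩
        exact hnt ⟨j, prefix_drop_take _ t j m hj⟩
      have hfr : PySem.Chars.find r "struct".toList = -1 := by
        apply find_none_of
        rintro ⟨j, hj⟩
        refine hnt ⟨m + 2 + j, ?_⟩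
        have hd : t.drop (m + 2 + j) = r.drop j := by
          conv_lhs => rw [hdecomp]
          rw [show m + 2 + j = p.length + 2 + j by omega]
          exact dropPSR p r j
        rw [hd]
        exact hj
      have hcharA : charA t = [] := by rw [charA, dif_pos hK]
      have hcharAr : charA r = [] := by rw [charA, dif_pos (by rw [hfr]; norm_num)]
      have hpart : fsdPart [] p = [] := by
        simp only [fsdPart, hfp]
        simp
      rw [hcharA, hcharAr, hpart]
      rfl
    · -- t contains "struct"; i' is its first position
      set i' := (PySem.Chars.find t "struct".toList).toNat with hi'
      obtain ⟨hK1, hK2⟩ := PySem.Chars.find_spec (s := t) (sub := "struct".toList) (not_lt.mp hK)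
      have hK1' : "struct".toList <+: (p ++ "};".toList ++ r).drop i' := by rwa [← hdecomp]
      rcases keyPos p r i' hK1' with hA | hB
      · -- first "struct" lies inside p
        rw [hplen] at hA
        have hfp : PySem.Chars.find p "struct".toList = (i' : Int) := by
          apply find_eq_of
          · rw [hp, List.drop_take]
            exact prefix_take _ _ _ hK1 (by have h6 : ("struct".toList).length = 6 := rfl; omega)
          · intro q hq hpre
            exact hK2 q hq (prefix_drop_take _ t q m hpre)
        have hj : PySem.Chars.find (t.drop i') "};".toList = ((m - i' : Nat) : Int) := by
          apply find_eq_of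
          · rw [List.drop_drop]
            have he : i' + (m - i') = m := by omega
            rw [he]
            exact ⟨u, hu⟩
          · intro q hq hpre
            rw [List.drop_drop] at hpre
            exact hS2 (i' + q) (by omega) hpre
        have hti : t.drop i' = (p.drop i' ++ "};".toList) ++ r := by
          conv_lhs => rw [hdecomp]
          rw [List.drop_append_of_le_length
                (show i' ≤ (p ++ "};".toList).length by
                  rw [List.length_append, hplen]
                  have h2 : ("};".toList).length = 2 := rfl
                  omega),
              List.drop_append_of_le_length (show i' ≤ p.length by omega)]
        have hblk : (t.drop i').take ((m - i') + 2) = p.drop i' ++ "};".toList := by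
          rw [hti]
          exact List.take_left' (by
            rw [List.length_append, List.length_drop, hplen]
            have h2 : ("};".toList).length = 2 := rfl
            omega)
        have hrec : (t.drop i').drop ((m - i') + 2) = r := by
          rw [hti]
          exact List.drop_left' (by
            rw [List.length_append, List.length_drop, hplen]
            have h2 : ("};".toList).length = 2 := rfl
            omega)
        have hpart : fsdPart [] p =
            if special_structs.any (fun ss => PySem.Chars.isIn ss (p.drop i' ++ "};".toList))
            then [] else [(p.drop i' ++ "};".toList) ++ ['
']] := by
          simp only [fsdPart, hfp, PySem.Chars.slice_eq_listSlice, PySem.List.slice_from_natCast]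
          have hne : ((i' : Int) ≠ -1) := by omega
          rw [if_pos hne]
          cases hv : special_structs.any (fun ss => PySem.Chars.isIn ss (p.drop i' ++ "};".toList)) <;>
            simp [hv]
        rw [charA, dif_neg hK, ← hi', hj]
        rw [dif_neg (by omega)]
        simp only [Int.toNat_natCast]
        rw [hblk, hrec, hpart]
      · -- first "struct" lies inside r: p contributes nothing
        rw [hplen] at hB
        have hfp : PySem.Chars.find p "struct".toList = -1 := by
          apply find_none_of
          rintro ⟨j, hj⟩
          have hjlen := hj.length_le
          have h6 : ("struct".toList).length = 6 := by decide
          rw [List.length_drop, hplen, h6] at hjlen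
          exact hK2 j (by omega) (prefix_drop_take _ t j m hj)
        have hshift : t.drop i' = r.drop (i' - (m + 2)) := by
          conv_lhs => rw [hdecomp, show i' = p.length + 2 + (i' - (m + 2)) by omega]
          exact dropPSR p r (i' - (m + 2))
        have hfr : PySem.Chars.find r "struct".toList = ((i' - (m + 2) : Nat) : Int) := by
          apply find_eq_of
          · rw [← hshift]
            exact hK1
          · intro q hq hpre
            refine hK2 (m + 2 + q) (by omega) ?_
            have hd : t.drop (m + 2 + q) = r.drop q := by
              conv_lhs => rw [hdecomp, show m + 2 + q = p.length + 2 + q by omega]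
              exact dropPSR p r q
            rw [hd]
            exact hpre
        have hAB : charA t = charA r := by
          apply charA_shift t r hK (by rw [hfr]; omega)
          rw [hfr, ← hi']
          simp only [Int.toNat_natCast]
          exact hshift
        have hpart : fsdPart [] p = [] := by
          simp only [fsdPart, hfp]
          simp
        rw [hAB, hpart]
        rfl

-- ---- A-side: fsdLoop computes charA of the suffix ----
lemma loopA_eq : ∀ (fuel : Nat) (s : List Char) (k : Nat) (acc : List (List Char)),
    k ≤ s.length → s.length + 1 ≤ fuel + k →
    fsdLoop s fuel (k : Int) acc = acc ++ charA (s.drop k) := by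
  intro fuel
  induction fuel with
  | zero => intro s k acc h1 h2; omega
  | succ f ih =>
    intro s k acc hk hfuel
    simp only [fsdLoop]
    rw [if_neg (show ¬((k : Int) = -1) by omega)]
    rw [PySem.Chars.findFrom_natCast s "struct".toList k hk]
    by_cases hA : PySem.Chars.find (s.drop k) "struct".toList = -1
    · rw [if_pos hA, if_pos rfl]
      have hc : charA (s.drop k) = [] := by
        rw [charA, dif_pos (by rw [hA]; norm_num)]
      rw [hc, List.append_nil]
    · have hA0 : 0 ≤ PySem.Chars.find (s.drop k) "struct".toList := by
        have := PySem.Chars.neg_one_le_find (s.drop k) "struct".toList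
        omega
      set i := PySem.Chars.find (s.drop k) "struct".toList with hi
      rw [if_neg hA]
      have hK1 := (PySem.Chars.find_spec (s := s.drop k) (sub := "struct".toList) hA0).1
      have hlen6 := hK1.length_le
      rw [show ("struct".toList).length = 6 from rfl, List.length_drop, List.length_drop] at hlen6
      have hki : k + i.toNat + 6 ≤ s.length := by omega
      have hcast : (k : Int) + i = ((k + i.toNat : Nat) : Int) := by omega
      rw [hcast]
      rw [if_neg (show ¬ ((k + i.toNat : Nat) : Int) = -1 by omega)]
      rw [PySem.Chars.findFrom_natCast s "};".toList (k + i.toNat) (by omega)]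
      have hdd : s.drop (k + i.toNat) = (s.drop k).drop i.toNat := by
        rw [List.drop_drop]
      rw [hdd]
      by_cases hBm : PySem.Chars.find ((s.drop k).drop i.toNat) "};".toList = -1
      · rw [if_pos hBm, if_pos rfl]
        have hc : charA (s.drop k) = [] := by
          rw [charA, dif_neg (show ¬ i < 0 by omega),
            dif_pos (show PySem.Chars.find ((s.drop k).drop i.toNat) "};".toList < 0 by rw [hBm]; norm_num)]
        rw [hc, List.append_nil]
      · have hB0 : 0 ≤ PySem.Chars.find ((s.drop k).drop i.toNat) "};".toList := by
          have := PySem.Chars.neg_one_le_find ((s.drop k).drop i.toNat) "};".toList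
          omega
        set j := PySem.Chars.find ((s.drop k).drop i.toNat) "};".toList with hj
        rw [if_neg hBm]
        rw [if_neg (show ¬ ((k + i.toNat : Nat) : Int) + j = -1 by omega)]
        have hS1 := (PySem.Chars.find_spec (s := (s.drop k).drop i.toNat) (sub := "};".toList) hB0).1
        have hlen2 := hS1.length_le
        rw [show ("};".toList).length = 2 from rfl, List.length_drop, List.length_drop,
          List.length_drop] at hlen2
        have hcast2 : ((k + i.toNat : Nat) : Int) + j + 2 = ((k + i.toNat + j.toNat + 2 : Nat) : Int) := by
          omega
        rw [hcast2]
        rw [PySem.Chars.slice_eq_listSlice, PySem.List.slice_natCast]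
        rw [show k + i.toNat + j.toNat + 2 - (k + i.toNat) = j.toNat + 2 by omega, hdd]
        rw [validFold]
        simp only [Bool.true_and]
        rw [ih s (k + i.toNat + j.toNat + 2) _ (by omega) (by omega)]
        conv_rhs => rw [charA]
        rw [dif_neg (show ¬ i < 0 by omega), dif_neg (show ¬ j < 0 by omega)]
        have hdrop2 : s.drop (k + i.toNat + j.toNat + 2) = ((s.drop k).drop i.toNat).drop (j.toNat + 2) := by
          rw [List.drop_drop, List.drop_drop]
          congr 1
          omega
        rw [hdrop2]
        cases hv : special_structs.any
            (fun ss => PySem.Chars.isIn ss (((s.drop k).drop i.toNat).take (j.toNat + 2))) <;>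
          (simp only [hv, Bool.not_true, Bool.not_false, eq_self_iff_true, if_true, if_false,
            Bool.false_eq_true, List.nil_append, List.append_assoc]; rfl)

-- ---- B-side: the fold equals gB ----
lemma fsdPart_acc (acc : List (List Char)) (p : List Char) :
    fsdPart acc p = acc ++ fsdPart [] p := by
  simp only [fsdPart]
  split_ifs <;> simp

lemma foldl_fsdPart : ∀ (l : List (List Char)) (acc : List (List Char)),
    l.foldl fsdPart acc = acc ++ l.foldl fsdPart [] := by
  intro l
  induction l with
  | nil => simp
  | cons p l ih =>
    intro acc
    simp only [List.foldl_cons]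
    rw [fsdPart_acc acc p, ih (acc ++ fsdPart [] p), ih (fsdPart [] p)]
    simp

lemma foldl_dropLast_eq_gB : ∀ parts : List (List Char),
    parts.dropLast.foldl fsdPart [] = gB parts := by
  intro parts
  match parts with
  | [] => rfl
  | [p] => rfl
  | p :: q :: rest =>
    rw [List.dropLast_cons₂, List.foldl_cons, gB]
    rw [foldl_fsdPart, foldl_dropLast_eq_gB (q :: rest)]

-- ===== VERDICT (by name: the statement is the Claim_ definition above) =====
theorem find_struct_declarations_spec : Claim_equal_find_struct_declarations := by
  intro s _
  unfold Spec_find_struct_declarations find_struct_declarations find_struct_declarations_alt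
  have hA : fsdLoop s.toList (s.toList.length + 1) 0 [] = charA s.toList := by
    have := loopA_eq (s.toList.length + 1) s.toList 0 [] (by omega) (by omega)
    simpa using this
  rw [hA, PySem.List.slice_to_neg_one, foldl_dropLast_eq_gB,
    ← core s.toList.length s.toList le_rfl]
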